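-- pv_equiv track=rewrite | github.com/dcoles/pylis | src/pylis/glyph.py | ascii2glyph
-- ===== SOURCE A (Python) =====
-- INK_CHARS = set(["#", "*", "X"])
--
-- def ascii2glyph(ascii_glyph):
--     """
--     Convert a ASCII glyph to a binary one
--     """
--
--     result = []
--     for line in ascii_glyph:
--         b = 0x00
--         for char in line:
--             b = b << 1
--             if char in INK_CHARS:
--                 b |= 0x01
--
--         result.append(b)
--     return result
-- ===== SOURCE B (Python) =====
-- INK_CHARS = set(["#", "*", "X"])
--
-- def ascii2glyph(ascii_glyph):
--     """
--     Convert a ASCII glyph to a binary one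
--     """
--     return [int('0' + ''.join('1' if c in INK_CHARS else '0' for c in line), 2)
--             for line in ascii_glyph]
-- ===== Notes on version B (the rewrite author's own statement) =====
-- stated objective: idiomatic
-- what changed: Replaces the explicit shift/OR accumulator loop per line with building a '0'/'1' digit string and a single base-2 integer parse (the '0' prefix makes an empty line parse to 0 naturally).
import Mathlib
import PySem

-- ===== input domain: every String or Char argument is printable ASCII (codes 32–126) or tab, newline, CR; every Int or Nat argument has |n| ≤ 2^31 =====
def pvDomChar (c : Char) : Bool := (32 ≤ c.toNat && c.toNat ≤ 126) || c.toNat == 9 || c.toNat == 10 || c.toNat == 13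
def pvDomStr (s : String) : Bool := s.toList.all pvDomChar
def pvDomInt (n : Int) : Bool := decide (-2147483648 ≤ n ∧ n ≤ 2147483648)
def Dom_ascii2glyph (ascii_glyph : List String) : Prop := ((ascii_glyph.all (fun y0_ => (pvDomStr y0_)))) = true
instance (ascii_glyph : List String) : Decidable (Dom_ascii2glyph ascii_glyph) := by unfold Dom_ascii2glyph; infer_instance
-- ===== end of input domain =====

-- ===== PORT A =====
-- B changes: builds a '0'/'1' digit string per line and parses it in base 2, instead of
-- A's running shift/OR accumulator (idiomatic decomposition; same cost).

-- Python: INK_CHARS = set(["#", "*", "X"])  (membership of single characters)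
def inkChars : List Char := ['#', '*', 'X']

-- inner loop: for char in line: b = b << 1; if char in INK_CHARS: b |= 1
def lineStepA (b : Int) (c : Char) : Int :=
  let b := b <<< (1 : Nat)
  if c ∈ inkChars then PySem.Int.bor b 1 else b

def ascii2glyph (ascii_glyph : List String) : List Int :=
  ascii_glyph.foldl (fun result line =>
    result ++ [line.toList.foldl lineStepA 0]) []

-- ===== PORT B =====
-- ''.join('1' if c in INK_CHARS else '0' for c in line)
def binDigit (c : Char) : Char := if c ∈ inkChars then '1' else '0'

-- int(s, 2) on a string of '0'/'1' digits (standard-library call, ported directly)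
def parseBin (ds : List Char) : Int :=
  ds.foldl (fun acc d => 2 * acc + (if d = '1' then 1 else 0)) 0

def ascii2glyph_alt (ascii_glyph : List String) : List Int :=
  ascii_glyph.map (fun line => parseBin ('0' :: line.toList.map binDigit))


-- ===== PRECONDITION & SPEC =====
def Spec_ascii2glyph (ascii_glyph : List String) (out : List Int) : Prop := out = ascii2glyph_alt ascii_glyph
instance (ascii_glyph : List String) (out : List Int) : Decidable (Spec_ascii2glyph ascii_glyph out) := by unfold Spec_ascii2glyph; infer_instance

-- ===== CLAIM (what is proved, stated in full; the proofs are below) =====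
def Claim_equal_ascii2glyph : Prop := ∀ (ascii_glyph : List String), Dom_ascii2glyph ascii_glyph → Spec_ascii2glyph ascii_glyph (ascii2glyph ascii_glyph)

-- ===== LEMMAS AND PROOFS =====

lemma shiftl_one (b : Int) : b <<< (1 : Nat) = 2 * b := by
  rw [Int.shiftLeft_eq]; ring

lemma nat_two_mul_lor_one (n : Nat) : 2 * n ||| 1 = 2 * n + 1 := by
  have h1 : 2 * n = Nat.bit false n := by simp [Nat.bit]
  have h2 : (1 : Nat) = Nat.bit true 0 := by simp [Nat.bit]
  rw [h1, h2, Nat.lor_bit]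
  simp [Nat.bit]

lemma bor_two_mul_one (b : Int) (h : 0 ≤ b) : PySem.Int.bor (2 * b) 1 = 2 * b + 1 := by
  rw [PySem.Int.bor_of_nonneg (by omega) (by omega)]
  have h1 : (2 * b).toNat = 2 * b.toNat := by omega
  have h2 : (1 : Int).toNat = 1 := rfl
  rw [h1, h2, nat_two_mul_lor_one]
  omega

lemma lineStepA_eq (b : Int) (c : Char) (h : 0 ≤ b) :
    lineStepA b c = 2 * b + (if binDigit c = '1' then 1 else 0) := by
  unfold lineStepA binDigit
  by_cases hc : c ∈ inkChars
  · simp only [hc, if_pos, shiftl_one, bor_two_mul_one b h]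
  · simp [hc, shiftl_one]

lemma line_eq (cs : List Char) (b : Int) (h : 0 ≤ b) :
    cs.foldl lineStepA b =
      (cs.map binDigit).foldl (fun acc d => 2 * acc + (if d = '1' then 1 else 0)) b := by
  induction cs generalizing b with
  | nil => rfl
  | cons c cs ih =>
    have hs := lineStepA_eq b c h
    have hnn : 0 ≤ lineStepA b c := by rw [hs]; split_ifs <;> omega
    simp only [List.map, List.foldl]
    rw [← hs, ih _ hnn]

lemma foldl_append_map (l : List String) (r0 : List Int) :
    l.foldl (fun result line => result ++ [line.toList.foldl lineStepA 0]) r0 =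
      r0 ++ l.map (fun line => line.toList.foldl lineStepA 0) := by
  induction l generalizing r0 with
  | nil => simp
  | cons x xs ih => simp [List.foldl, ih]

-- ===== VERDICT (by name: the statement is the Claim_ definition above) =====
theorem ascii2glyph_spec : Claim_equal_ascii2glyph := by
  intro l _
  unfold Spec_ascii2glyph ascii2glyph ascii2glyph_alt
  rw [foldl_append_map]
  simp only [List.nil_append]
  apply List.map_congr_left
  intro line _
  rw [line_eq _ _ le_rfl]
  simp [parseBin, List.foldl]
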